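-- pv_equiv track=rewrite | github.com/kathytowerz/MN-Gradiente-Descendente-Funciones-Propias | Gradiente Descendente con funciones propias.py | M_Matricial
-- ===== SOURCE A (Python) =====
-- def M_Matricial (A,b):
--     C=[]
--     for i in range(len(A)):
--         for j in range(len(b)):
--             x=0
--             for n in range(len(A[0])):
--                 x=x+A[i][n]*b[n]
--         C.append(x)
--     return C
-- ===== SOURCE B (Python) =====
-- def M_Matricial(A, b):
--     # column-major accumulation: one pass over the columns, updating all row sums
--     n = len(A)
--     if n == 0:
--         return []
--     m = len(A[0])
--     s = [0] * n
--     for k in range(m):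
--         bk = b[k]
--         for i in range(n):
--             s[i] += A[i][k] * bk
--     return s
-- ===== Notes on version B (the rewrite author's own statement) =====
-- stated objective: faster
-- what changed: B traverses the matrix column-major, maintaining a vector of row accumulators updated once per column, instead of A's row-major triple loop that recomputes each row's dot product len(b) times.
import Mathlib
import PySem

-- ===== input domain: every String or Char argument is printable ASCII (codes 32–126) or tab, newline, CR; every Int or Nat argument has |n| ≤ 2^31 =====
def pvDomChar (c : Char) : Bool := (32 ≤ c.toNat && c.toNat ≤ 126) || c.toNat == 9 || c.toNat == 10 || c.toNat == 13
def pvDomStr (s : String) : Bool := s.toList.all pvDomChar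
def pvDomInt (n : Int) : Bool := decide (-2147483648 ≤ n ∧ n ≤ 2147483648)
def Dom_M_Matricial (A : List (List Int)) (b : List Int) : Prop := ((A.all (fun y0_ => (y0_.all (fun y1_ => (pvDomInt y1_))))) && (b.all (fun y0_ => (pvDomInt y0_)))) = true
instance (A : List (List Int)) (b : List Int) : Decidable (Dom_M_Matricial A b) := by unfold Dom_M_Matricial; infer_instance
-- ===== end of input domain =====

-- B traverses the matrix column-major with a vector of row accumulators, updating every
-- row's partial sum once per column, instead of A's row-major triple loop that recomputes
-- each row's dot product len(b) times (objective: faster).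

-- ===== PORT A =====
-- literal transliteration: outer loop over i appends x; middle loop over j recomputes x
-- from 0 each time; inner loop over n accumulates A[i][n]*b[n] (pyGetD is exact here
-- because Pre_ keeps every index in range; out of range Python raises).
def M_Matricial (A : List (List Int)) (b : List Int) : List Int :=
  (PySem.List.pyRange 0 A.length 1).foldl (fun C i =>
    let x : Int := (PySem.List.pyRange 0 b.length 1).foldl (fun _x _j =>
      (PySem.List.pyRange 0 (PySem.List.pyGetD A 0 []).length 1).foldl
        (fun x n => x + PySem.List.pyGetD (PySem.List.pyGetD A i []) n 0 * PySem.List.pyGetD b n 0)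
        0) 0
    C ++ [x]) []

-- ===== PORT B =====
-- transliteration of Source B: s = [0]*n; for k in range(m): for i in range(n): s[i] += A[i][k]*b[k].
-- All indices are nonnegative and in range under Pre_, so List.getD / List.set are exact there.
def M_Matricial_alt (A : List (List Int)) (b : List Int) : List Int :=
  let n := A.length
  if n = 0 then []
  else
    let m := (A.getD 0 []).length
    (List.range m).foldl (fun s k =>
      let bk := b.getD k 0
      (List.range n).foldl (fun u i =>
        u.set i (u.getD i 0 + (A.getD i []).getD k 0 * bk)) s)
      (List.replicate n 0)

-- ===== PRECONDITION & SPEC =====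
-- Pre_ excludes exactly the inputs where Python A raises: b empty while A is not
-- (x is never assigned: UnboundLocalError), or some index A[i][n] / b[n] out of range
-- for n < len(A[0]) (IndexError).
def Pre_M_Matricial (A : List (List Int)) (b : List Int) : Prop :=
  A = [] ∨ (b ≠ [] ∧ (A.headD []).length ≤ b.length ∧ ∀ row ∈ A, (A.headD []).length ≤ row.length)
instance (A : List (List Int)) (b : List Int) : Decidable (Pre_M_Matricial A b) := by unfold Pre_M_Matricial; infer_instance

def pvWitness_M_Matricial : List (List Int) × List Int := ([[1, 2], [3, 4]], [5, 6])

def Spec_M_Matricial (A : List (List Int)) (b : List Int) (out : List Int) : Prop := out = M_Matricial_alt A b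
instance (A : List (List Int)) (b : List Int) (out : List Int) : Decidable (Spec_M_Matricial A b out) := by unfold Spec_M_Matricial; infer_instance

-- ===== CLAIM (what is proved, stated in full; the proofs are below) =====
def Claim_equal_M_Matricial : Prop := ∀ (A : List (List Int)) (b : List Int), Dom_M_Matricial A b → Pre_M_Matricial A b → Spec_M_Matricial A b (M_Matricial A b)

-- ===== LEMMAS AND PROOFS =====

-- a foldl that ignores its accumulator and arguments returns the constant on a nonempty list
theorem foldl_const_int {α : Type} (c : Int) : ∀ (xs : List α) (init : Int), xs ≠ [] →
    xs.foldl (fun _ _ => c) init = c := by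
  intro xs
  induction xs with
  | nil => intro init h; exact absurd rfl h
  | cons x xs ih =>
    intro init _
    simp only [List.foldl_cons]
    cases xs with
    | nil => rfl
    | cons y ys => exact ih c (by simp)

-- a map over the index range of xs, where the index is only used to fetch xs[i], is a map over xs
theorem map_pyRange_index {α β : Type} (xs : List α) (d : α) (g : α → β) :
    (PySem.List.pyRange 0 (xs.length : Int) 1).map (fun i => g (PySem.List.pyGetD xs i d)) = xs.map g := by
  have h : (fun i => g (PySem.List.pyGetD xs i d)) = g ∘ (fun i => PySem.List.pyGetD xs i d) := rfl
  rw [h, ← List.map_map, PySem.List.map_pyGetD_pyRange_zero']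

-- folding set-updates at the shifted indices keeps the head fixed
theorem fold_set_shift (g : Nat → Int) : ∀ (l : List Nat) (y : Int) (t : List Int),
    l.foldl (fun u i => u.set (i + 1) (u.getD (i + 1) 0 + g i)) (y :: t)
      = y :: l.foldl (fun u i => u.set i (u.getD i 0 + g i)) t := by
  intro l
  induction l with
  | nil => intro y t; rfl
  | cons i l ih =>
    intro y t
    simp only [List.foldl_cons, List.set_cons_succ, List.getD_cons_succ]
    exact ih y _

-- "for i in range(len(s)): s[i] += g(i)" is mapIdx: each slot is read before it is written
theorem fold_set_mapIdx : ∀ (s : List Int) (g : Nat → Int),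
    (List.range s.length).foldl (fun u i => u.set i (u.getD i 0 + g i)) s
      = s.mapIdx (fun i x => x + g i) := by
  intro s
  induction s with
  | nil => intro g; simp
  | cons x s ih =>
    intro g
    rw [List.length_cons, List.range_succ_eq_map]
    simp only [List.foldl_cons, List.foldl_map, List.set_cons_zero, List.getD_cons_zero,
      List.mapIdx_cons]
    rw [fold_set_shift (fun i => g (i + 1)) _ (x + g 0) s, ih (fun i => g (i + 1))]

-- pointwise update of the mapped list is a map of the pointwise-updated function
theorem mapIdx_map_getD (A : List (List Int)) (g h : List Int → Int) :
    (A.map g).mapIdx (fun i x => x + h (A.getD i [])) = A.map (fun row => g row + h row) := by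
  apply List.ext_getElem (by simp)
  intro i h1 h2
  simp only [List.getElem_mapIdx, List.getElem_map]
  rw [List.getD_eq_getElem A [] (by simpa using h2)]

-- B's column-major accumulation computes, for each row, the index-based dot product over m columns
theorem cols (A : List (List Int)) (b : List Int) : ∀ (m : Nat),
    (List.range m).foldl (fun s k =>
        (List.range A.length).foldl (fun u i =>
          u.set i (u.getD i 0 + (A.getD i []).getD k 0 * b.getD k 0)) s)
      (List.replicate A.length 0)
    = A.map (fun row => (List.range m).foldl (fun x k => x + row.getD k 0 * b.getD k 0) 0) := by
  intro m
  induction m with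
  | zero => simp [List.map_const']
  | succ m ih =>
    rw [List.range_succ, List.foldl_append, ih, List.foldl_cons, List.foldl_nil]
    have hlen : (A.map (fun row => (List.range m).foldl (fun x k => x + row.getD k 0 * b.getD k 0) 0)).length = A.length := by simp
    rw [← hlen, fold_set_mapIdx _ (fun i => (A.getD i []).getD m 0 * b.getD m 0),
      mapIdx_map_getD A _ (fun row => row.getD m 0 * b.getD m 0)]
    apply List.map_congr_left
    intro row _
    rw [List.foldl_append, List.foldl_cons, List.foldl_nil]

theorem M_Matricial_spec : Claim_equal_M_Matricial := by
  intro A b _ hpre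
  unfold Spec_M_Matricial
  rcases hpre with h | ⟨hb, hmb, hrows⟩
  · subst h; simp [M_Matricial, M_Matricial_alt, PySem.List.pyRange_zero_nat]
  · cases A with
    | nil => simp [M_Matricial, M_Matricial_alt, PySem.List.pyRange_zero_nat]
    | cons a0 A' =>
      -- both sides reduce to the same list of index-based dot products over a0.length columns
      have hA : M_Matricial (a0 :: A') b
          = (a0 :: A').map (fun row =>
              (List.range a0.length).foldl (fun x n => x + row.getD n 0 * b.getD n 0) 0) := by
        unfold M_Matricial
        -- the outer append-singleton foldl is a map over the range of row indices
        rw [PySem.List.foldl_append_singleton_eq_map]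
        rw [map_pyRange_index (a0 :: A') []
          (fun row => (PySem.List.pyRange 0 (b.length : Int) 1).foldl (fun _x _j =>
            (PySem.List.pyRange 0 ((PySem.List.pyGetD (a0 :: A') 0 []).length : Int) 1).foldl
              (fun x n => x + PySem.List.pyGetD row n 0 * PySem.List.pyGetD b n 0) 0) 0)]
        simp only [List.nil_append]
        apply List.map_congr_left
        intro row hmem
        -- the middle (j) loop recomputes the same value each time; b ≠ [] so it runs at least once
        rw [foldl_const_int _ _ _ (by
          intro hnil
          have := PySem.List.length_pyRange_one 0 b.length
          rw [hnil] at this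
          simp at this
          exact hb (List.length_eq_zero_iff.mp (by omega)))]
        -- the inner (n) loop is the index-based dot product over range a0.length
        rw [PySem.List.pyGetD_zero_cons]
        rw [PySem.List.pyRange_one 0 a0.length]
        simp [List.foldl_map, PySem.List.pyGetD_natCast]
      have hB : M_Matricial_alt (a0 :: A') b
          = (a0 :: A').map (fun row =>
              (List.range a0.length).foldl (fun x n => x + row.getD n 0 * b.getD n 0) 0) := by
        unfold M_Matricial_alt
        simp only [List.length_cons, if_neg (Nat.succ_ne_zero A'.length), List.getD_cons_zero]
        simpa using cols (a0 :: A') b a0.length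
      rw [hA, hB]
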